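-- pv_equiv track=rewrite | github.com/wangzizhe/GateForge | gateforge/governance_replay_risk.py | _latest_non_pass_streak
-- ===== SOURCE A (Python) =====
-- def _latest_non_pass_streak(rows: list[dict]) -> int:
--     streak = 0
--     for row in reversed(rows):
--         decision = str(row.get("decision") or "UNKNOWN").upper()
--         if decision in {"NEEDS_REVIEW", "FAIL"}:
--             streak += 1
--         else:
--             break
--     return streak
-- ===== SOURCE B (Python) =====
-- def _latest_non_pass_streak(rows: list[dict]) -> int:
--     streak = 0
--     for row in rows:
--         decision = str(row.get("decision") or "UNKNOWN").upper()
--         if decision in {"NEEDS_REVIEW", "FAIL"}: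
--             streak += 1
--         else:
--             streak = 0
--     return streak
-- ===== Notes on version B (the rewrite author's own statement) =====
-- stated objective: alternative
-- what changed: Single forward pass keeping a running streak that resets to 0 on a pass decision, instead of iterating the reversed list and breaking at the first pass.
import Mathlib
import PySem

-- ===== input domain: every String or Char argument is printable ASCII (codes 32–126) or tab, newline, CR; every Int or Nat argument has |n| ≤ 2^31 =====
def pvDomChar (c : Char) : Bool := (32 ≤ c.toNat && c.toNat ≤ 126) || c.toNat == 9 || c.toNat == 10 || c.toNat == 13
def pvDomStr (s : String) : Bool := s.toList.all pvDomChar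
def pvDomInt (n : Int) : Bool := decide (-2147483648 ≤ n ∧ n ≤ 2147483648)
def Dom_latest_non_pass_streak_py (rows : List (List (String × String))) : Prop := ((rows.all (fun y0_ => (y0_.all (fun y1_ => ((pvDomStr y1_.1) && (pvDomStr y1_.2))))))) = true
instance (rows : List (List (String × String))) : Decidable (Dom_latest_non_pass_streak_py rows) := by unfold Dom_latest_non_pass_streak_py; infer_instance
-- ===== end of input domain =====

-- B replaces A's reversed-iteration-with-break by a single forward pass whose streak resets on a pass decision (alternative decomposition, same cost).


-- ===== PORT A =====
-- decision = str(row.get("decision") or "UNKNOWN").upper()  (row.get misses → None; "" is falsy)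
def pvDecisionA (row : List (String × String)) : String :=
  PySem.Str.upper
    (match (PySem.Dict.mk row).get? "decision" with
     | none => "UNKNOWN"
     | some s => if s = "" then "UNKNOWN" else s)

-- the 'for row in reversed(rows): … else: break' loop, as structural recursion over rows.reverse
def pvLoopA : List (List (String × String)) → Int
  | [] => 0
  | row :: rest =>
      let decision := pvDecisionA row
      if decision = "NEEDS_REVIEW" ∨ decision = "FAIL" then pvLoopA rest + 1 else 0

def latest_non_pass_streak_py (rows : List (List (String × String))) : Int :=
  pvLoopA rows.reverse

-- ===== PORT B =====  (same normalization expression as A, so the helper pvDecisionA is shared)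
-- forward fold: streak += 1 on a non-pass decision, streak = 0 otherwise
def latest_non_pass_streak_py_alt (rows : List (List (String × String))) : Int :=
  rows.foldl
    (fun streak row =>
      let decision := pvDecisionA row
      if decision = "NEEDS_REVIEW" ∨ decision = "FAIL" then streak + 1 else 0)
    0

-- ===== PRECONDITION & SPEC =====
def Spec_latest_non_pass_streak_py (rows : List (List (String × String))) (out : Int) : Prop := out = latest_non_pass_streak_py_alt rows
instance (rows : List (List (String × String))) (out : Int) : Decidable (Spec_latest_non_pass_streak_py rows out) := by unfold Spec_latest_non_pass_streak_py; infer_instance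

-- ===== CLAIM (what is proved, stated in full; the proofs are below) =====
def Claim_equal_latest_non_pass_streak_py : Prop := ∀ (rows : List (List (String × String))), Dom_latest_non_pass_streak_py rows → Spec_latest_non_pass_streak_py rows (latest_non_pass_streak_py rows)

-- ===== LEMMAS AND PROOFS =====
-- the forward fold (from any start 0) equals the backward break-loop; proved by induction from the right
theorem pv_fold_eq_loop (rows : List (List (String × String))) :
    rows.foldl
      (fun streak row =>
        let decision := pvDecisionA row
        if decision = "NEEDS_REVIEW" ∨ decision = "FAIL" then streak + 1 else 0)
      0 = pvLoopA rows.reverse := by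
  induction rows using List.reverseRecOn with
  | nil => rfl
  | append_singleton xs x ih =>
      rw [List.foldl_append, List.reverse_append]
      simp only [List.foldl_cons, List.foldl_nil, List.reverse_cons, List.reverse_nil,
        List.nil_append, List.singleton_append, pvLoopA]
      split <;> [exact congrArg (· + 1) ih; rfl]

-- ===== VERDICT (by name: the statement is the Claim_ definition above) =====
theorem latest_non_pass_streak_py_spec : Claim_equal_latest_non_pass_streak_py := by
  intro rows _
  unfold Spec_latest_non_pass_streak_py latest_non_pass_streak_py latest_non_pass_streak_py_alt
  exact (pv_fold_eq_loop rows).symm
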